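-- pv_equiv track=rewrite | github.com/thomasahle/tensorgrad | tensorgrad/functions.py | _is_even_permutation
-- ===== SOURCE A (Python) =====
-- from typing import Any, Iterable, Iterator, Sequence, Union
--
-- def _is_even_permutation(permutation: Sequence[int]) -> bool:
--     """
--     Checks if given permutation is even.
--     >>> is_even_permutation(range(10))
--     True
--     >>> is_even_permutation(range(10)[::-1])
--     False
--     """
--     if len(permutation) == 1:
--         return True
--     transitions_count = 0
--     for index, element in enumerate(permutation):
--         for next_element in permutation[index + 1 :]:
--             if element > next_element:
--                 transitions_count += 1
--     return not (transitions_count % 2)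
-- ===== SOURCE B (Python) =====
-- def _is_even_permutation(permutation):
--     # Merge-sort inversion counting: O(n log n) instead of A's O(n^2) nested scan.
--     def msort(a):
--         if len(a) <= 1:
--             return a, 0
--         m = len(a) // 2
--         ls, cl = msort(a[:m])
--         rs, cr = msort(a[m:])
--         merged = []
--         cm = 0
--         i = j = 0
--         while i < len(ls) and j < len(rs):
--             if ls[i] <= rs[j]:
--                 merged.append(ls[i])
--                 i += 1
--             else:
--                 merged.append(rs[j])
--                 cm += len(ls) - i
--                 j += 1
--         merged.extend(ls[i:])
--         merged.extend(rs[j:])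
--         return merged, cl + cr + cm
--     _, inv = msort(list(permutation))
--     return inv % 2 == 0
-- ===== Notes on version B (the rewrite author's own statement) =====
-- stated objective: faster
-- what changed: Replaces A's nested quadratic scan over all pairs with a merge-sort that counts inversions during merging and takes the count's parity.
import Mathlib
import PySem

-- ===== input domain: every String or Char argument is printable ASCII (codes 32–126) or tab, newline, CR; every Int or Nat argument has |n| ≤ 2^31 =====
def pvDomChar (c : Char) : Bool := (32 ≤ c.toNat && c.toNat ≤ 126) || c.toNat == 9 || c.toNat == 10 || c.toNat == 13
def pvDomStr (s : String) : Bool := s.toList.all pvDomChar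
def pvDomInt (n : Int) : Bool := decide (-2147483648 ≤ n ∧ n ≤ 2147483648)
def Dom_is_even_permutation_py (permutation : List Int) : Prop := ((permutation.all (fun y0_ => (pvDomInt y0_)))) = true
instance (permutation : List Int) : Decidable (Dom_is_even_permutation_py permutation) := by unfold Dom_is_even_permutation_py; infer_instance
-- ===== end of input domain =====

-- B replaces A's quadratic all-pairs inversion scan by merge-sort inversion counting (faster, asymptotic).


-- ===== PORT A =====
def is_even_permutation_py (permutation : List Int) : Bool :=
  if permutation.length == 1 then true
  else
    let transitions_count : Int :=
      (PySem.List.enumerate permutation).foldl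
        (fun acc p =>
          (PySem.List.slice permutation (some (p.1 + 1)) none).foldl
            (fun a next_element => if p.2 > next_element then a + 1 else a) acc)
        0
    transitions_count % 2 == 0   -- `not (transitions_count % 2)`: truthiness of an int

-- ===== PORT B =====
-- the while-loop merge of Source B, as structural recursion on the two lists
def mergeCnt : List Int → List Int → List Int × Nat
  | [], ys => (ys, 0)
  | x :: xs, [] => (x :: xs, 0)
  | x :: xs, y :: ys =>
    if x ≤ y then
      let r := mergeCnt xs (y :: ys)
      (x :: r.1, r.2)
    else
      let r := mergeCnt (x :: xs) ys
      (y :: r.1, r.2 + (xs.length + 1))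
termination_by xs ys => xs.length + ys.length

def msortCnt (l : List Int) : List Int × Nat :=
  if h : l.length ≤ 1 then (l, 0)
  else
    let m := l.length / 2
    let r1 := msortCnt (l.take m)
    let r2 := msortCnt (l.drop m)
    let r3 := mergeCnt r1.1 r2.1
    (r3.1, r1.2 + r2.2 + r3.2)
termination_by l.length
decreasing_by
  · simp only [List.length_take]; omega
  · simp only [List.length_drop]; omega

def is_even_permutation_py_alt (permutation : List Int) : Bool :=
  (msortCnt permutation).2 % 2 == 0

-- ===== PRECONDITION & SPEC =====
def Spec_is_even_permutation_py (permutation : List Int) (out : Bool) : Prop := out = is_even_permutation_py_alt permutation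
instance (permutation : List Int) (out : Bool) : Decidable (Spec_is_even_permutation_py permutation out) := by unfold Spec_is_even_permutation_py; infer_instance

-- ===== CLAIM (what is proved, stated in full; the proofs are below) =====
def Claim_equal_is_even_permutation_py : Prop := ∀ (permutation : List Int), Dom_is_even_permutation_py permutation → Spec_is_even_permutation_py permutation (is_even_permutation_py permutation)

-- ===== LEMMAS AND PROOFS =====

-- the inversion count of a list
def inv : List Int → Nat
  | [] => 0
  | x :: xs => xs.countP (fun y => decide (y < x)) + inv xs

-- cross inversions between two blocks
def cross (xs ys : List Int) : Nat :=
  (xs.map (fun x => ys.countP (fun y => decide (y < x)))).sum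

theorem cross_nil_right (xs : List Int) : cross xs [] = 0 := by
  simp [cross]

theorem inv_append (xs ys : List Int) : inv (xs ++ ys) = inv xs + inv ys + cross xs ys := by
  induction xs with
  | nil => simp [inv, cross]
  | cons x xs ih =>
      simp only [List.cons_append, inv, List.countP_append, cross, List.map_cons, List.sum_cons]
      rw [ih]
      simp only [cross]
      omega

theorem cross_perm {xs xs' ys ys' : List Int} (h1 : xs.Perm xs') (h2 : ys.Perm ys') :
    cross xs ys = cross xs' ys' := by
  unfold cross
  have hpt : ∀ x : Int, ys.countP (fun y => decide (y < x)) = ys'.countP (fun y => decide (y < x)) :=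
    fun x => h2.countP_eq _
  calc (xs.map (fun x => ys.countP (fun y => decide (y < x)))).sum
      = (xs.map (fun x => ys'.countP (fun y => decide (y < x)))).sum := by
        congr 1; exact List.map_congr_left (fun x _ => hpt x)
    _ = (xs'.map (fun x => ys'.countP (fun y => decide (y < x)))).sum :=
        (h1.map _).sum_eq

theorem mergeCnt_perm (xs ys : List Int) : (mergeCnt xs ys).1.Perm (xs ++ ys) := by
  fun_induction mergeCnt xs ys with
  | case1 ys => simp
  | case2 x xs => simp
  | case3 x xs y ys h r ih =>
      simp only [if_pos h]
      exact (ih.cons x)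
  | case4 x xs y ys h r ih =>
      simp only [if_neg h]
      exact (ih.cons y).trans List.perm_middle.symm

theorem mergeCnt_sorted {xs ys : List Int} (hx : xs.Sorted (· ≤ ·)) (hy : ys.Sorted (· ≤ ·)) :
    (mergeCnt xs ys).1.Sorted (· ≤ ·) := by
  fun_induction mergeCnt xs ys with
  | case1 ys => exact hy
  | case2 x xs => exact hx
  | case3 x xs y ys h r ih =>
      simp only [if_pos h]
      have hxs := (List.sorted_cons.mp hx).2
      have ih' := ih hxs hy
      refine List.sorted_cons.mpr ⟨?_, ih'⟩
      intro b hb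
      have hb' : b ∈ xs ++ y :: ys := (mergeCnt_perm xs (y :: ys)).subset hb
      rcases List.mem_append.mp hb' with hbl | hbr
      · exact (List.sorted_cons.mp hx).1 b hbl
      · rcases List.mem_cons.mp hbr with rfl | hbys
        · exact h
        · exact le_trans h ((List.sorted_cons.mp hy).1 b hbys)
  | case4 x xs y ys h r ih =>
      simp only [if_neg h]
      have hys := (List.sorted_cons.mp hy).2
      have ih' := ih hx hys
      refine List.sorted_cons.mpr ⟨?_, ih'⟩
      intro b hb
      have hb' : b ∈ (x :: xs) ++ ys := (mergeCnt_perm (x :: xs) ys).subset hb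
      have hyx : y ≤ x := le_of_lt (lt_of_not_ge h)
      rcases List.mem_append.mp hb' with hbl | hbr
      · rcases List.mem_cons.mp hbl with rfl | hbxs
        · exact hyx
        · exact le_trans hyx ((List.sorted_cons.mp hx).1 b hbxs)
      · exact (List.sorted_cons.mp hy).1 b hbr

theorem mergeCnt_cnt {xs ys : List Int} (hx : xs.Sorted (· ≤ ·)) (hy : ys.Sorted (· ≤ ·)) :
    (mergeCnt xs ys).2 = cross xs ys := by
  fun_induction mergeCnt xs ys with
  | case1 ys => simp [cross]
  | case2 x xs => simp [cross_nil_right]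
  | case3 x xs y ys h r ih =>
      simp only [if_pos h]
      have hxs := (List.sorted_cons.mp hx).2
      rw [ih hxs hy]
      have hzero : (y :: ys).countP (fun z => decide (z < x)) = 0 := by
        rw [List.countP_eq_zero]
        intro z hz
        rcases List.mem_cons.mp hz with rfl | hzys
        · simp; omega
        · have := (List.sorted_cons.mp hy).1 z hzys
          simp; omega
      simp only [cross, List.map_cons, List.sum_cons, hzero]
      omega
  | case4 x xs y ys h r ih =>
      simp only [if_neg h]
      have hys := (List.sorted_cons.mp hy).2
      rw [ih hx hys]
      have hyx : y < x := lt_of_not_ge h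
      -- each element of x :: xs is > y, so y adds 1 to each of the (xs.length + 1) counts
      have hcount : ∀ x' ∈ x :: xs,
          (y :: ys).countP (fun z => decide (z < x')) = ys.countP (fun z => decide (z < x')) + 1 := by
        intro x' hx'
        have hxx' : x ≤ x' := by
          rcases List.mem_cons.mp hx' with rfl | hmem
          · exact le_refl _
          · exact (List.sorted_cons.mp hx).1 x' hmem
        simp only [List.countP_cons]
        have : decide (y < x') = true := by simp; omega
        rw [this]
        simp
      unfold cross
      rw [List.map_congr_left (fun x' hx' => hcount x' hx')]
      have hsum : ∀ (l : List Int),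
          (l.map (fun x' => ys.countP (fun z => decide (z < x')) + 1)).sum
            = (l.map (fun x' => ys.countP (fun z => decide (z < x')))).sum + l.length := by
        intro l
        induction l with
        | nil => simp
        | cons a l ihl => simp [ihl]; omega
      rw [hsum]
      simp

theorem msortCnt_spec (l : List Int) :
    (msortCnt l).1.Perm l ∧ (msortCnt l).1.Sorted (· ≤ ·) ∧ (msortCnt l).2 = inv l := by
  fun_induction msortCnt l with
  | case1 l h =>
      refine ⟨List.Perm.refl _, ?_, ?_⟩
      · match l, h with
        | [], _ => exact List.Pairwise.nil
        | [x], _ => exact List.pairwise_singleton _ _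
      · match l, h with
        | [], _ => rfl
        | [x], _ => rfl
  | case2 l h m r1 r2 r3 ih1 ih2 =>
      obtain ⟨hp1, hs1, hc1⟩ := ih1
      obtain ⟨hp2, hs2, hc2⟩ := ih2
      have hperm : r3.1.Perm l := by
        have := mergeCnt_perm r1.1 r2.1
        refine this.trans ?_
        refine (hp1.append hp2).trans ?_
        rw [List.take_append_drop]
      refine ⟨hperm, mergeCnt_sorted hs1 hs2, ?_⟩
      have hcm : r3.2 = cross (l.take m) (l.drop m) := by
        have := mergeCnt_cnt hs1 hs2
        rw [this]
        exact cross_perm hp1 hp2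
      have hinv : inv l = inv (l.take m) + inv (l.drop m) + cross (l.take m) (l.drop m) := by
        conv_lhs => rw [← List.take_append_drop m l]
        exact inv_append _ _
      rw [show r1.2 = (msortCnt (l.take m)).2 from rfl, show r2.2 = (msortCnt (l.drop m)).2 from rfl,
        hc1, hc2, show r3.2 = (mergeCnt r1.1 r2.1).2 from rfl, mergeCnt_cnt hs1 hs2,
        cross_perm hp1 hp2, hinv]

-- A's nested fold computes the inversion count
theorem A_enum_sum (L : List Int) : ∀ (xs : List Int) (n : Nat), L.drop n = xs →
    ((PySem.List.enumerate xs (n : Int)).map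
       (fun p => ((L.drop (p.1.toNat + 1)).countP (fun y => decide (y < p.2)) : Int))).sum
      = (inv xs : Int) := by
  intro xs
  induction xs with
  | nil => intro n _; simp [PySem.List.enumerate, inv]
  | cons x xs ih =>
      intro n hdrop
      have hcons : PySem.List.enumerate (x :: xs) (n : Int)
          = ((n : Int), x) :: PySem.List.enumerate xs ((n : Int) + 1) := by
        have := PySem.List.enumerate_append [x] xs (n : Int)
        simpa [PySem.List.enumerate] using this
      have hdrop1 : L.drop (n + 1) = xs := by
        rw [← List.drop_drop, hdrop]
        simp
      have hcast : ((n : Int) + 1) = ((n + 1 : Nat) : Int) := by push_cast; ring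
      rw [hcons]
      simp only [List.map_cons, List.sum_cons]
      rw [hcast, ih (n + 1) hdrop1]
      have hhead : ((n : Int)).toNat + 1 = n + 1 := by omega
      rw [hhead, hdrop1]
      simp [inv]

theorem A_count (L : List Int) :
    ((PySem.List.enumerate L).foldl
        (fun acc p =>
          (PySem.List.slice L (some (p.1 + 1)) none).foldl
            (fun a next_element => if p.2 > next_element then a + 1 else a) acc)
        0 : Int) = (inv L : Int) := by
  have hstep : ∀ (acc : Int) (p : Int × Int), p ∈ PySem.List.enumerate L →
      (PySem.List.slice L (some (p.1 + 1)) none).foldl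
        (fun a next_element => if p.2 > next_element then a + 1 else a) acc
      = acc + ((L.drop (p.1.toNat + 1)).countP (fun y => decide (y < p.2)) : Int) := by
    intro acc p hp
    obtain ⟨k, hk, rfl⟩ := (PySem.List.mem_enumerate_iff L 0 _).mp hp
    have h0 : (0 : Int) + (k : Int) = (k : Int) := by ring
    have hnn : (0 : Int) ≤ (k : Int) + 1 := by positivity
    rw [h0, PySem.List.slice_from L hnn]
    have htn : ((k : Int) + 1).toNat = k + 1 := by omega
    have htn' : ((k : Int)).toNat = k := by omega
    rw [htn, htn']
    have := PySem.List.foldl_if_add_one (fun y => decide (y < L[k])) (L.drop (k + 1)) acc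
    simpa using this
  rw [PySem.List.foldl_congr_mem _ _ _ _ hstep]
  rw [PySem.List.foldl_add]
  rw [zero_add]
  exact A_enum_sum L L 0 (by simp)

theorem A_eq_parity (L : List Int) : is_even_permutation_py L = ((inv L : Int) % 2 == 0) := by
  unfold is_even_permutation_py
  by_cases h : L.length == 1
  · rw [if_pos h]
    match L, h with
    | [x], _ => simp [inv]
  · rw [if_neg h]
    simp only [A_count]

-- ===== VERDICT (by name: the statement is the Claim_ definition above) =====
theorem is_even_permutation_py_spec : Claim_equal_is_even_permutation_py := by
  intro L _
  unfold Spec_is_even_permutation_py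
  rw [A_eq_parity]
  unfold is_even_permutation_py_alt
  rw [(msortCnt_spec L).2.2]
  rcases Nat.even_or_odd (inv L) with he | ho
  · obtain ⟨k, hk⟩ := he
    have h1 : inv L % 2 = 0 := by omega
    have h2 : (inv L : Int) % 2 = 0 := by omega
    simp [h1, h2]
  · obtain ⟨k, hk⟩ := ho
    have h1 : inv L % 2 = 1 := by omega
    have h2 : (inv L : Int) % 2 = 1 := by omega
    simp [h1, h2]
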